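-- pv_equiv track=rewrite | github.com/baasman/cookvault | backend/cookbook_db_utils/pdf_cookbook_seeder.py | _simple_text_segmentation
-- ===== SOURCE A (Python) =====
-- from typing import List, Dict, Optional, Tuple, Any
--
-- def _simple_text_segmentation(text: str) -> List[str]:
--     """Simple text segmentation for fallback processing"""
--     # Split on likely recipe boundaries
--     segments = []
--
--     # Look for recipe titles (lines in all caps or title case)
--     lines = text.split("\n")
--     current_segment = []
--
--     for line in lines:
--         line = line.strip()
--         if not line:
--             if current_segment:
--                 current_segment.append("")
--             continue
--
--         # Check if this looks like a recipe title
--         if (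
--             len(line) > 5
--             and len(line) < 100
--             and (line.isupper() or line.istitle())
--             and not line.startswith(
--                 ("1.", "2.", "3.", "4.", "5.", "6.", "7.", "8.", "9.")
--             )
--         ):
--
--             # Save previous segment
--             if current_segment:
--                 segments.append("\n".join(current_segment))
--                 current_segment = []
--
--             # Start new segment
--             current_segment.append(line)
--         else:
--             current_segment.append(line)
--
--     # Don't forget the last segment
--     if current_segment:
--         segments.append("\n".join(current_segment))
--
--     # If no segmentation worked, return the whole text as one segment
--     if not segments:
--         segments = [text]
--
--     return segments
-- ===== SOURCE B (Python) =====
-- def _is_title(ln: str) -> bool: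
--     return (
--         5 < len(ln) < 100
--         and (ln.isupper() or ln.istitle())
--         and not (len(ln) >= 2 and ln[0] in "123456789" and ln[1] == ".")
--     )
--
--
-- def _simple_text_segmentation(text: str):
--     """Normalize first (strip every line, drop leading blanks), then peel one
--     segment at a time: a segment is the current line plus all following lines
--     up to the next title line."""
--     stripped = [ln.strip() for ln in text.split("\n")]
--     i = 0
--     while i < len(stripped) and not stripped[i]:
--         i += 1
--     if i == len(stripped):
--         return [text]
--     segments = []
--     while i < len(stripped):
--         j = i + 1
--         while j < len(stripped) and not _is_title(stripped[j]):
--             j += 1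
--         segments.append("\n".join(stripped[i:j]))
--         i = j
--     return segments
-- ===== Notes on version B (the rewrite author's own statement) =====
-- stated objective: alternative
-- what changed: Instead of one stateful pass carrying (segments, current_segment) with emit-on-boundary, B first normalizes (strips every line, drops leading blanks, deciding the [text] fallback up front) and then peels one segment at a time off the front: each segment is the current line plus the following run of non-title lines.
import Mathlib
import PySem

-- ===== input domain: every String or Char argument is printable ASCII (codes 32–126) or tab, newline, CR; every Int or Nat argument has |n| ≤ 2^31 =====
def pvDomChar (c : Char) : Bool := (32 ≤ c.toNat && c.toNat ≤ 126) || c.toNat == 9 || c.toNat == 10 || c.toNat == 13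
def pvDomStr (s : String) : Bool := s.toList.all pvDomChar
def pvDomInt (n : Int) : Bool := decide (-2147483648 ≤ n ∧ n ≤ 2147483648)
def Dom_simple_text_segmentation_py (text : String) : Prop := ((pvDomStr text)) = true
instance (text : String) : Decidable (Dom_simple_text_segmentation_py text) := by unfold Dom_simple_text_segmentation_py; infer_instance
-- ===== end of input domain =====

-- B re-implements A by a different decomposition (normalize all lines first, then peel segments off the front); same cost, objective: alternative.

-- Shared ports of the Python built-ins str.isupper / str.istitle (hand-ported; exact on the ASCII domain — checked against CPython on printable ASCII + tab/CR).
def pyStrIsupper (cs : List Char) : Bool :=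
  cs.any (fun c => PySem.Chars.isupper c) && !cs.any (fun c => PySem.Chars.islower c)

def pyIstitleGo (cs : List Char) (prevCased : Bool) (found : Bool) : Bool :=
  match cs with
  | [] => found
  | c :: rest =>
    if PySem.Chars.isupper c then
      if prevCased then false else pyIstitleGo rest true true
    else if PySem.Chars.islower c then
      if prevCased then pyIstitleGo rest true true else false
    else pyIstitleGo rest false found

def pyStrIstitle (cs : List Char) : Bool := pyIstitleGo cs false false

-- ===== PORT A =====
-- A's inline "looks like a recipe title" condition, with the 9-way startswith tuple kept literal.
def titleA (l : List Char) : Bool :=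
  decide (5 < l.length) && decide (l.length < 100) && (pyStrIsupper l || pyStrIstitle l) &&
  !(PySem.Chars.startswith l ['1','.'] || PySem.Chars.startswith l ['2','.'] ||
    PySem.Chars.startswith l ['3','.'] || PySem.Chars.startswith l ['4','.'] ||
    PySem.Chars.startswith l ['5','.'] || PySem.Chars.startswith l ['6','.'] ||
    PySem.Chars.startswith l ['7','.'] || PySem.Chars.startswith l ['8','.'] ||
    PySem.Chars.startswith l ['9','.'])

-- the for-loop over lines, carrying (segments, current_segment); the post-loop flush is the [] case
def loopA (lines : List (List Char)) (segs : List String) (cur : List (List Char)) : List String :=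
  match lines with
  | [] => if cur ≠ [] then segs ++ [String.ofList (PySem.Chars.join ['\n'] cur)] else segs
  | line :: rest =>
    let l := PySem.Chars.strip line
    if l = [] then
      if cur ≠ [] then loopA rest segs (cur ++ [[]]) else loopA rest segs cur
    else if titleA l then
      loopA rest (if cur ≠ [] then segs ++ [String.ofList (PySem.Chars.join ['\n'] cur)] else segs) [l]
    else
      loopA rest segs (cur ++ [l])

def simple_text_segmentation_py (text : String) : List String :=
  let lines := PySem.Chars.splitOn text.toList ['\n']
  let segments := loopA lines [] []
  if segments = [] then [text] else segments

-- ===== PORT B =====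
def isTitleLineB (ln : List Char) : Bool :=
  decide (5 < ln.length) && decide (ln.length < 100) && (pyStrIsupper ln || pyStrIstitle ln) &&
  !(match ln with
    | c1 :: c2 :: _ => decide ('1' ≤ c1 ∧ c1 ≤ '9') && (c2 == '.')
    | _ => false)

-- outer while: peel one segment (current line + following non-title lines) per step
def segGroupsB (norm : List (List Char)) : List String :=
  match norm with
  | [] => []
  | h :: t =>
    String.ofList (PySem.Chars.join ['\n'] (h :: t.takeWhile (fun l => !isTitleLineB l)))
      :: segGroupsB (t.dropWhile (fun l => !isTitleLineB l))
termination_by norm.length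
decreasing_by
  simp only [List.length_cons]
  exact Nat.lt_succ_of_le (List.length_dropWhile_le _ _)

def simple_text_segmentation_py_alt (text : String) : List String :=
  let stripped := (PySem.Chars.splitOn text.toList ['\n']).map PySem.Chars.strip
  let norm := stripped.dropWhile (fun l => l.isEmpty)
  if norm.isEmpty then [text] else segGroupsB norm

-- ===== PRECONDITION & SPEC =====
def Spec_simple_text_segmentation_py (text : String) (out : List String) : Prop := out = simple_text_segmentation_py_alt text
instance (text : String) (out : List String) : Decidable (Spec_simple_text_segmentation_py text out) := by unfold Spec_simple_text_segmentation_py; infer_instance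

-- ===== CLAIM (what is proved, stated in full; the proofs are below) =====
def Claim_equal_simple_text_segmentation_py : Prop := ∀ (text : String), Dom_simple_text_segmentation_py text → Spec_simple_text_segmentation_py text (simple_text_segmentation_py text)

-- ===== LEMMAS AND PROOFS =====

-- A's title condition and B's are the same predicate
theorem startswith_two (c : Char) (l : List Char) : PySem.Chars.startswith l [c, '.'] =
    (match l with | c1 :: c2 :: _ => (c1 == c) && (c2 == '.') | _ => false) := by
  match l with
  | [] => simp [PySem.Chars.startswith, List.isPrefixOf]
  | [a] => simp [PySem.Chars.startswith, List.isPrefixOf]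
  | a :: b :: t => simp [PySem.Chars.startswith, List.isPrefixOf, Bool.and_comm, BEq.comm]

theorem digit_range (c : Char) :
    (c == '1' || c == '2' || c == '3' || c == '4' || c == '5' || c == '6' || c == '7' || c == '8' || c == '9') = decide ('1' ≤ c ∧ c ≤ '9') := by
  rw [Bool.eq_iff_iff]
  have h1 : ('1').val.toNat = 49 := by decide
  have h2 : ('2').val.toNat = 50 := by decide
  have h3 : ('3').val.toNat = 51 := by decide
  have h4 : ('4').val.toNat = 52 := by decide
  have h5 : ('5').val.toNat = 53 := by decide
  have h6 : ('6').val.toNat = 54 := by decide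
  have h7 : ('7').val.toNat = 55 := by decide
  have h8 : ('8').val.toNat = 56 := by decide
  have h9 : ('9').val.toNat = 57 := by decide
  simp only [Bool.or_eq_true, beq_iff_eq, Char.ext_iff, decide_eq_true_eq, Char.le_def,
    UInt32.le_iff_toNat_le, ← UInt32.toNat_inj, h1, h2, h3, h4, h5, h6, h7, h8, h9]
  omega

theorem title_eq (l : List Char) : titleA l = isTitleLineB l := by
  unfold titleA isTitleLineB
  simp only [startswith_two]
  match l with
  | [] => rfl
  | [a] => rfl
  | a :: b :: t =>
    simp only [← digit_range]
    cases hb : (b == '.') <;> cases ha : (a == '1') <;> simp_all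

-- prefixing the accumulated segments factors out
theorem loopA_segs (lines : List (List Char)) : ∀ (segs : List String) (cur : List (List Char)),
    loopA lines segs cur = segs ++ loopA lines [] cur := by
  induction lines with
  | nil => intro segs cur; simp only [loopA]; by_cases h : cur = [] <;> simp [h]
  | cons line rest ih =>
    intro segs cur
    simp only [loopA]
    by_cases h1 : PySem.Chars.strip line = []
    · by_cases h2 : cur = [] <;> simp only [h1, h2, ne_eq, not_true_eq_false, not_false_eq_true,
        ite_true, ite_false] <;> exact ih segs _
    · by_cases h3 : titleA (PySem.Chars.strip line)
      · by_cases h2 : cur = []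
        · simp only [h1, h2, h3, ne_eq, not_true_eq_false, ite_true, ite_false]
          exact ih segs _
        · simp only [h1, h2, h3, ne_eq, not_false_eq_true, ite_true, ite_false,
            List.nil_append]
          rw [ih (segs ++ [String.ofList (PySem.Chars.join ['\n'] cur)]),
            ih [String.ofList (PySem.Chars.join ['\n'] cur)]]
          simp
      · simp only [h1, h3, ite_false]
        exact ih segs _

theorem segGroupsB_cons (h : List Char) (t : List (List Char)) :
    segGroupsB (h :: t) =
      String.ofList (PySem.Chars.join ['\n'] (h :: t.takeWhile (fun l => !isTitleLineB l)))
        :: segGroupsB (t.dropWhile (fun l => !isTitleLineB l)) := by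
  rw [segGroupsB]

-- main invariant: with a nonempty current segment, the loop emits cur ++ (non-title prefix) then proceeds as B
theorem loopA_main (lines : List (List Char)) : ∀ (cur : List (List Char)), cur ≠ [] →
    loopA lines [] cur =
      String.ofList (PySem.Chars.join ['\n']
          (cur ++ (lines.map PySem.Chars.strip).takeWhile (fun l => !isTitleLineB l)))
        :: segGroupsB ((lines.map PySem.Chars.strip).dropWhile (fun l => !isTitleLineB l)) := by
  induction lines with
  | nil => intro cur h; rw [loopA]; simp [h, segGroupsB]
  | cons line rest ih =>
    intro cur h
    rw [loopA]
    simp only [List.map_cons]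
    by_cases h1 : PySem.Chars.strip line = []
    · have ht : isTitleLineB (PySem.Chars.strip line) = false := by rw [h1]; decide
      rw [List.takeWhile_cons, List.dropWhile_cons]
      simp only [ht, Bool.not_false, h, ne_eq, not_false_eq_true]
      rw [ih (cur ++ [[]]) (by simp), h1]
      simp
    · by_cases h2 : titleA (PySem.Chars.strip line)
      · have ht : isTitleLineB (PySem.Chars.strip line) = true := by rw [← title_eq]; exact h2
        rw [List.takeWhile_cons, List.dropWhile_cons]
        simp only [h1, h2, ht, Bool.not_true, Bool.false_eq_true, h, ne_eq, not_false_eq_true, ite_true, ite_false]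
        rw [loopA_segs, ih [PySem.Chars.strip line] (by simp)]
        rw [segGroupsB_cons]
        simp
      · have ht : isTitleLineB (PySem.Chars.strip line) = false := by rw [← title_eq]; simp [h2]
        rw [List.takeWhile_cons, List.dropWhile_cons]
        simp only [h1, h2, ht, Bool.not_false, ite_true, ite_false]
        rw [ih (cur ++ [PySem.Chars.strip line]) (by simp)]
        simp

-- with empty current segment, the loop is B's "drop leading blanks, then group"
theorem loopA_zero (lines : List (List Char)) :
    loopA lines [] [] = segGroupsB ((lines.map PySem.Chars.strip).dropWhile (fun l => l.isEmpty)) := by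
  induction lines with
  | nil => rw [loopA]; simp [segGroupsB]
  | cons line rest ih =>
    rw [loopA]
    simp only [List.map_cons, List.dropWhile_cons]
    by_cases h1 : PySem.Chars.strip line = []
    · simp only [h1, List.isEmpty_nil, ite_true, ne_eq, not_true_eq_false]
      simpa using ih
    · have he : (PySem.Chars.strip line).isEmpty = false := by
        simp [h1]
      have key : loopA rest [] [PySem.Chars.strip line] = segGroupsB (PySem.Chars.strip line :: rest.map PySem.Chars.strip) := by
        rw [loopA_main rest [PySem.Chars.strip line] (by simp), segGroupsB_cons]
        simp
      by_cases h2 : titleA (PySem.Chars.strip line) <;>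
        simp only [h1, h2, he, ite_true, ite_false, ne_eq, not_true_eq_false,
          List.nil_append] <;> exact key

-- ===== VERDICT (by name: the statement is the Claim_ definition above) =====
theorem simple_text_segmentation_py_spec : Claim_equal_simple_text_segmentation_py := by
  intro text _
  unfold Spec_simple_text_segmentation_py simple_text_segmentation_py simple_text_segmentation_py_alt
  simp only [loopA_zero]
  cases hn : (((PySem.Chars.splitOn text.toList ['\n']).map PySem.Chars.strip).dropWhile (fun l => l.isEmpty)) with
  | nil => simp [segGroupsB]
  | cons h t => simp [segGroupsB]
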